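-- pv_equiv track=rewrite | github.com/tommyasni08/Fraud-Projects | Quick Python Practice/running_metrics.py | running_user_totals
-- ===== SOURCE A (Python) =====
-- from collections import defaultdict
--
-- def running_user_totals(events):
--     by = defaultdict(list)
--     for u, amt, t in events: by[u].append((t, amt))
--     out = []
--     for u, lst in by.items():
--         lst.sort()
--         s = 0
--         for t, amt in lst:
--             s += amt
--             out.append((u, t, s))
--     out.sort()  # optional stable presentation
--     return out
-- ===== SOURCE B (Python) =====
-- def running_user_totals(events):
--     out = []
--     totals = {}
--     for u, t, amt in sorted((u, t, a) for u, a, t in events):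
--         s = totals.get(u, 0) + amt
--         totals[u] = s
--         out.append((u, t, s))
--     out.sort()
--     return out
-- ===== Notes on version B (the rewrite author's own statement) =====
-- stated objective: simpler
-- what changed: Replaced the defaultdict grouping, per-group sorts and nested loops by one sort of all (user, t, amt) triples followed by a single pass that keeps a per-user running-total dict.
import Mathlib
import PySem

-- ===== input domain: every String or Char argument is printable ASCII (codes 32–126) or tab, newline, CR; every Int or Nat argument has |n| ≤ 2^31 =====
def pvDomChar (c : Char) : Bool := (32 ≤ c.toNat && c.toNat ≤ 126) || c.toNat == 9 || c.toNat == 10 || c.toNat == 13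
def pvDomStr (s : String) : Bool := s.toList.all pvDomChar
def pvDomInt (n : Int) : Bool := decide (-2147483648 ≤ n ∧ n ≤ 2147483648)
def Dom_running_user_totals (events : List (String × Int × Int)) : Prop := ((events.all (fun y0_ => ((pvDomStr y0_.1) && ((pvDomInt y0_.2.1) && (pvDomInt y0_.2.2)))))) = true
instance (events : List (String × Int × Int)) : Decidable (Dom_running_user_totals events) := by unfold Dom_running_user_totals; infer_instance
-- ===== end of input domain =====

-- B replaces A's defaultdict grouping + per-group sort + nested loops by ONE sort of all
-- (user, t, amt) triples plus a single pass carrying a per-user total dict (objective: simpler).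

-- Shared port of Python's list.sort() on (str, int, int) triples: PySem.List.sorted (Python's
-- sort) with a key that is an order-embedding onto Python's lexicographic tuple order (exact:
-- Python compares such triples lexicographically component by component).
def pvKey3 (x : String × Int × Int) : Lex (String × Lex (Int × Int)) :=
  toLex (x.1, toLex (x.2.1, x.2.2))

def sortTriples (xs : List (String × Int × Int)) : List (String × Int × Int) :=
  PySem.List.sorted xs pvKey3 false

-- ===== PORT A =====
def running_user_totals (events : List (String × Int × Int)) : List (String × Int × Int) :=
  let byD : PySem.Dict String (List (Int × Int)) :=
    events.foldl (fun d e => d.modify e.1 [] (fun l => l ++ [(e.2.2, e.2.1)])) PySem.Dict.empty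
  let out : List (String × Int × Int) :=
    byD.items.foldl (fun out p =>
      ((PySem.List.sorted2 p.2 (fun q => q.1) (fun q => q.2)).foldl
        (fun acc q => (acc.1 ++ [(p.1, q.1, acc.2 + q.2)], acc.2 + q.2)) (out, 0)).1) []
  sortTriples out

-- ===== PORT B =====
def running_user_totals_alt (events : List (String × Int × Int)) : List (String × Int × Int) :=
  let es := sortTriples (events.map (fun e => (e.1, e.2.2, e.2.1)))
  let r := es.foldl (fun st e =>
      let s := st.2.getD e.1 0 + e.2.2
      (st.1 ++ [(e.1, e.2.1, s)], st.2.insert e.1 s))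
    (([] : List (String × Int × Int)), (PySem.Dict.empty : PySem.Dict String Int))
  sortTriples r.1

-- ===== PRECONDITION & SPEC =====
def Spec_running_user_totals (events : List (String × Int × Int)) (out : List (String × Int × Int)) : Prop := out = running_user_totals_alt events
instance (events : List (String × Int × Int)) (out : List (String × Int × Int)) : Decidable (Spec_running_user_totals events out) := by unfold Spec_running_user_totals; infer_instance

-- ===== CLAIM (what is proved, stated in full; the proofs are below) =====
def Claim_equal_running_user_totals : Prop := ∀ (events : List (String × Int × Int)), Dom_running_user_totals events → Spec_running_user_totals events (running_user_totals events)

-- ===== LEMMAS AND PROOFS =====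

-- the running-sum triples of one user, starting from total s
def pvRun (u : String) (s : Int) : List (Int × Int) → List (String × Int × Int)
  | [] => []
  | q :: ps => (u, q.1, s + q.2) :: pvRun u (s + q.2) ps

lemma pvRun_fst (u : String) (s : Int) (ps : List (Int × Int)) :
    ∀ x ∈ pvRun u s ps, x.1 = u := by
  induction ps generalizing s with
  | nil => simp [pvRun]
  | cons q ps ih =>
    intro x hx
    rcases (by simpa [pvRun] using hx) with h | h
    · simp [h]
    · exact ih _ x h

lemma pvRun_filter (u v : String) (s : Int) (ps : List (Int × Int)) :
    (pvRun u s ps).filter (fun x => x.1 == v) = if u = v then pvRun u s ps else [] := by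
  by_cases h : u = v
  · subst h
    rw [if_pos rfl, List.filter_eq_self]
    intro x hx; simpa using pvRun_fst u s ps x hx
  · rw [if_neg h, List.filter_eq_nil_iff]
    intro x hx
    have := pvRun_fst u s ps x hx
    simpa [this] using h

-- A's inner loop builds out ++ pvRun
lemma innerA (u : String) (lst : List (Int × Int)) (out : List (String × Int × Int)) (s : Int) :
    (lst.foldl (fun acc q => (acc.1 ++ [(u, q.1, acc.2 + q.2)], acc.2 + q.2)) (out, s)).1
      = out ++ pvRun u s lst := by
  induction lst generalizing out s with
  | nil => simp [pvRun]
  | cons q ps ih => simp [List.foldl_cons, ih, pvRun]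

-- sorted2 is sorted with the lexicographic product key
lemma sorted2_eq_sorted_toLex {α : Type} (xs : List α) (k1 : α → Int) (k2 : α → Int) :
    PySem.List.sorted2 xs k1 k2 false
      = PySem.List.sorted xs (fun x => toLex (k1 x, k2 x)) false := by
  show xs.foldl (fun acc x => PySem.List.insertBy _ x acc) []
      = xs.foldl (fun acc x => PySem.List.insertBy _ x acc) []
  congr 1
  funext acc x
  congr 1
  funext a b
  rcases lt_trichotomy (k1 a) (k1 b) with h | h | h
  · simp [Prod.Lex.lt_iff, h]
  · simp [Prod.Lex.lt_iff, h]
  · have h1 : ¬ k1 a < k1 b := asymm h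
    have h2 : k1 a ≠ k1 b := ne_of_gt h
    simp [Prod.Lex.lt_iff, h, h1, h2]

-- B's fold: filtering its output to one user yields that user's running triples
lemma foldB_filter (es : List (String × Int × Int)) (out : List (String × Int × Int))
    (d : PySem.Dict String Int) (v : String) :
    ((es.foldl (fun st e =>
        (st.1 ++ [(e.1, e.2.1, st.2.getD e.1 0 + e.2.2)], st.2.insert e.1 (st.2.getD e.1 0 + e.2.2)))
      (out, d)).1).filter (fun x => x.1 == v)
    = out.filter (fun x => x.1 == v)
      ++ pvRun v (d.getD v 0) ((es.filter (fun x => x.1 == v)).map (fun x => x.2)) := by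
  induction es generalizing out d with
  | nil => simp [pvRun]
  | cons e es ih =>
    rw [List.foldl_cons, ih]
    by_cases h : e.1 = v
    · subst h
      simp [List.filter_append, PySem.Dict.getD_insert_self, pvRun]
    · have h' : (e.1 == v) = false := by simpa using h
      have hg : (d.insert e.1 (d.getD e.1 0 + e.2.2)).getD v 0 = d.getD v 0 := by
        rw [PySem.Dict.getD_insert]; exact if_neg (Ne.symm h)
      simp [List.filter_append, h', hg]

lemma flatMap_if_single {β : Type} (l : List String) (hnd : l.Nodup) (G : String → List β) (v : String) :
    (l.flatMap (fun k => if k = v then G k else [])) = if v ∈ l then G v else [] := by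
  induction l with
  | nil => simp
  | cons k l ih =>
    simp only [List.nodup_cons] at hnd
    rw [List.flatMap_cons, ih hnd.2]
    by_cases h : k = v
    · subst h
      simp [hnd.1]
    · simp [h, Ne.symm h]

-- two lists with equal per-first-component filters are permutations of each other
lemma perm_of_filter_fst_eq (l₁ l₂ : List (String × Int × Int))
    (h : ∀ v, l₁.filter (fun x => x.1 == v) = l₂.filter (fun x => x.1 == v)) :
    l₁.Perm l₂ := by
  rw [List.perm_iff_count]
  intro a
  have pa : (fun x : String × Int × Int => x.1 == a.1) a = true := by simp
  calc l₁.count a = (l₁.filter (fun x => x.1 == a.1)).count a :=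
        (List.count_filter (p := fun x : String × Int × Int => x.1 == a.1) (a := a) (l := l₁) pa).symm
    _ = (l₂.filter (fun x => x.1 == a.1)).count a := by rw [h]
    _ = l₂.count a :=
        List.count_filter (p := fun x : String × Int × Int => x.1 == a.1) (a := a) (l := l₂) pa

lemma pvKey3_injective : Function.Injective pvKey3 := by
  rintro ⟨a1, a2, a3⟩ ⟨b1, b2, b3⟩ h
  simpa [pvKey3, Prod.ext_iff] using h

-- filtering the lex-sorted triples to one user and dropping the user is sorted2 of its pairs
lemma sortTriples_filter (ms : List (String × Int × Int)) (v : String) :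
    ((sortTriples ms).filter (fun x => x.1 == v)).map (fun x => x.2)
      = PySem.List.sorted2 ((ms.filter (fun x => x.1 == v)).map (fun x => x.2))
          (fun q => q.1) (fun q => q.2) false := by
  apply PySem.List.eq_of_perm_of_pairwise_le_of_injective
    (key := fun q : Int × Int => (toLex q : Lex (Int × Int))) toLex.injective
  · exact (((PySem.List.sorted_perm ms pvKey3 false).filter _).map _).trans
      (PySem.List.sorted2_perm _ _ _ _).symm
  · rw [List.pairwise_map]
    have h1 : (sortTriples ms).Pairwise (fun a b => pvKey3 a ≤ pvKey3 b) :=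
      PySem.List.sorted_pairwise ms pvKey3
    have h2 := h1.sublist (List.filter_sublist (p := fun x => x.1 == v) (l := sortTriples ms))
    refine h2.imp_of_mem ?_
    intro a b ha hb hab
    have hav : a.1 = v := by simpa using (List.mem_filter.mp ha).2
    have hbv : b.1 = v := by simpa using (List.mem_filter.mp hb).2
    rcases Prod.Lex.le_iff.mp hab with h | h
    · simp only [pvKey3, ofLex_toLex] at h
      rw [hav, hbv] at h
      exact absurd h (lt_irrefl v)
    · have h2 := h.2
      simp only [pvKey3, ofLex_toLex] at h2
      exact h2
  · rw [sorted2_eq_sorted_toLex]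
    have := PySem.List.sorted_pairwise ((ms.filter (fun x => x.1 == v)).map (fun x => x.2))
      (fun q => toLex (q.1, q.2))
    simpa using this

theorem running_user_totals_spec : Claim_equal_running_user_totals := by
  intro events _
  unfold Spec_running_user_totals running_user_totals running_user_totals_alt
  set ms : List (String × Int × Int) := events.map (fun e => (e.1, e.2.2, e.2.1)) with hms
  set byD : PySem.Dict String (List (Int × Int)) :=
    events.foldl (fun d e => d.modify e.1 [] (fun l => l ++ [(e.2.2, e.2.1)])) PySem.Dict.empty
    with hbyD
  -- dict facts
  have hfold : byD = ms.foldl (fun d p => d.modify p.1 [] (fun l => l ++ [p.2])) PySem.Dict.empty := by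
    rw [hbyD, hms, List.foldl_map]
  have hgetD : ∀ vv : String,
      byD.getD vv [] = (ms.filter (fun p => p.1 == vv)).map (fun p => p.2) := by
    intro vv
    rw [hfold, PySem.Dict.getD_foldl_modify_append, PySem.Dict.getD_empty]
    simp
  have hkeys : byD.keys = PySem.Set.ofList (ms.map (fun p => p.1)) := by
    rw [hfold, PySem.Dict.keys_foldl_modify_key ms (fun p => p.1) []
      (fun _ p => fun l => l ++ [p.2]) PySem.Dict.empty]
    rw [PySem.Set.ofList_eq_foldl]
    rfl
  have hnd : byD.keys.Nodup := by
    rw [hfold]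
    exact PySem.Dict.nodup_keys_foldl_modify_key ms (fun p => p.1) []
      (fun _ p => fun l => l ++ [p.2]) PySem.Dict.empty (by simp [PySem.Dict.keys_empty])
  have hitems := PySem.Dict.items_eq_map_keys byD hnd []
  -- A's pre-sort output as a flatMap over the dict items
  set outA : List (String × Int × Int) :=
    byD.items.foldl (fun out p =>
      ((PySem.List.sorted2 p.2 (fun q => q.1) (fun q => q.2)).foldl
        (fun acc q => (acc.1 ++ [(p.1, q.1, acc.2 + q.2)], acc.2 + q.2)) (out, 0)).1) []
    with houtA
  have hA : outA = byD.items.flatMap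
      (fun p => pvRun p.1 0 (PySem.List.sorted2 p.2 (fun q => q.1) (fun q => q.2))) := by
    rw [houtA, PySem.List.foldl_congr_mem _ _
      (fun out p => out ++ pvRun p.1 0 (PySem.List.sorted2 p.2 (fun q => q.1) (fun q => q.2))) _
      (fun acc p _ => innerA p.1 _ acc 0),
      PySem.List.foldl_append_eq_flatMap]
    simp
  -- B's pre-sort output
  set es := sortTriples ms with hes
  set outB : List (String × Int × Int) :=
    (es.foldl (fun st e =>
      (st.1 ++ [(e.1, e.2.1, st.2.getD e.1 0 + e.2.2)], st.2.insert e.1 (st.2.getD e.1 0 + e.2.2)))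
      ([], PySem.Dict.empty)).1 with houtB
  -- the two pre-sort outputs agree on every per-user filter
  have hflt : ∀ v, outA.filter (fun x => x.1 == v) = outB.filter (fun x => x.1 == v) := by
    intro v
    have hBside : outB.filter (fun x => x.1 == v)
        = pvRun v 0 (PySem.List.sorted2 ((ms.filter (fun x => x.1 == v)).map (fun x => x.2))
            (fun q => q.1) (fun q => q.2) false) := by
      rw [houtB, foldB_filter, PySem.Dict.getD_empty, sortTriples_filter]
      simp
    have hAside : outA.filter (fun x => x.1 == v)
        = if v ∈ byD.keys then
            pvRun v 0 (PySem.List.sorted2 (byD.getD v []) (fun q => q.1) (fun q => q.2))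
          else [] := by
      rw [hA, List.filter_flatMap]
      have : ∀ p ∈ byD.items,
          (pvRun p.1 0 (PySem.List.sorted2 p.2 (fun q => q.1) (fun q => q.2))).filter
            (fun x => x.1 == v)
          = if p.1 = v then pvRun p.1 0 (PySem.List.sorted2 p.2 (fun q => q.1) (fun q => q.2))
            else [] := fun p _ => pvRun_filter p.1 v 0 _
      rw [List.flatMap_congr this]
      rw [hitems]
      rw [List.flatMap_map]
      exact flatMap_if_single byD.keys hnd
        (fun k => pvRun k 0 (PySem.List.sorted2 (byD.getD k []) (fun q => q.1) (fun q => q.2))) v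
    rw [hAside, hBside]
    by_cases hv : v ∈ byD.keys
    · rw [if_pos hv, hgetD v]
    · rw [if_neg hv]
      have : ms.filter (fun x => x.1 == v) = [] := by
        rw [List.filter_eq_nil_iff]
        intro x hx hxv
        exact hv (by
          rw [hkeys, PySem.Set.mem_ofList]
          exact List.mem_map.mpr ⟨x, hx, by simpa using hxv⟩)
      rw [this]
      rfl
  -- conclude: sorting permutations with an injective key gives equal lists
  show sortTriples outA = sortTriples outB
  exact PySem.List.sorted_eq_sorted_of_perm outA outB pvKey3 pvKey3_injective
    (perm_of_filter_fst_eq _ _ hflt)
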